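-- pv_equiv track=rewrite | github.com/DSC-Capstone/projects-2020-2021 | projects/project_19/src/utils/utils.py | limit_data
-- ===== SOURCE A (Python) =====
-- def limit_data(labels,limit=20,val_num=500,test_num=1000):
--     '''
--     Get the index of train, validation, and test data
--     '''
--     label_counter = dict((l, 0) for l in labels)
--     train_idx = []
--
--     for i in range(len(labels)):
--         label = labels[i]
--         if label_counter[label]<limit:
--             #add the example to the training data
--             train_idx.append(i)
--             label_counter[label]+=1
--
--         #exit the loop once we found 20 examples for each class
--         if all(count == limit for count in label_counter.values()):
--             break
--
--     #get the indices that do not go to traning data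
--     rest_idx = [x for x in range(len(labels)) if x not in train_idx]
--     #get the first val_num
--     val_idx = rest_idx[:val_num]
--     test_idx = rest_idx[val_num:(val_num+test_num)]
--     return train_idx, val_idx, test_idx
-- ===== SOURCE B (Python) =====
-- def limit_data(labels, limit=20, val_num=500, test_num=1000):
--     '''
--     Get the index of train, validation, and test data
--     '''
--     counts = {}
--     train_idx = []
--     rest_idx = []
--     for i, label in enumerate(labels):
--         c = counts.get(label, 0)
--         if c < limit:
--             train_idx.append(i)
--             counts[label] = c + 1
--         else:
--             rest_idx.append(i)
--     return train_idx, rest_idx[:val_num], rest_idx[val_num:val_num + test_num]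
-- ===== Notes on version B (the rewrite author's own statement) =====
-- stated objective: faster
-- what changed: One partitioning pass that appends each index directly to train or rest using a grow-as-you-go count dict, replacing A's pre-initialised counter dict, the all()/break scan and the quadratic 'x not in train_idx' re-scan of range(len(labels)).
import Mathlib
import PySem

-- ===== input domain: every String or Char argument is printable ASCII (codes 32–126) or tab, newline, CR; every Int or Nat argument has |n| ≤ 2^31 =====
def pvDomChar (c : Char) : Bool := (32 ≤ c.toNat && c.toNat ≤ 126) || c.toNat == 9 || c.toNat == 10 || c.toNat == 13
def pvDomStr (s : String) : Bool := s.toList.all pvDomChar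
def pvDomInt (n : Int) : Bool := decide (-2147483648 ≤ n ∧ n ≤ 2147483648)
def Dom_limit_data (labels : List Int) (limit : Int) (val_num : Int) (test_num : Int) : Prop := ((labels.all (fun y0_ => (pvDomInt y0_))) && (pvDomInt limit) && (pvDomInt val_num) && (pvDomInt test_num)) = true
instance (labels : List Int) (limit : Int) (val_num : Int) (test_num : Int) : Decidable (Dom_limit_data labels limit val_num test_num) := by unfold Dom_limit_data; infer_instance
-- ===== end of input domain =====

-- B replaces A's two passes (capped train build with all()/break, then a quadratic
-- 'x not in train_idx' re-scan) by a single partitioning pass over enumerate(labels);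
-- asymptotically faster (O(n) vs A's O(n^2) re-scan) with a provably identical return value.

-- shared helper: list(enumerate(xs)) with Int indices starting at i
def pvEnum (i : Int) : List Int → List (Int × Int)
  | [] => []
  | l :: ls => (i, l) :: pvEnum (i + 1) ls

-- ===== PORT A =====
-- A's for-loop over range(len(labels)): labels[i] is read in order, so we walk the
-- enumerated list; the 'break' is the early exit when all counter values equal limit.
def limit_data_loopA (limit : Int) : List (Int × Int) → PySem.Dict Int Int → List Int → PySem.Dict Int Int × List Int
  | [], d, tr => (d, tr)
  | (i, label) :: rest, d, tr =>
    -- label_counter[label] always present: the dict was initialised with every label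
    let p := if d.getD label 0 < limit then (d.insert label (d.getD label 0 + 1), tr ++ [i]) else (d, tr)
    if p.1.values.all (fun c => c == limit) then p
    else limit_data_loopA limit rest p.1 p.2

def limit_data (labels : List Int) (limit : Int) (val_num : Int) (test_num : Int) : List Int × List Int × List Int :=
  let label_counter : PySem.Dict Int Int := labels.foldl (fun d l => d.insert l 0) PySem.Dict.empty
  let r := limit_data_loopA limit (pvEnum 0 labels) label_counter []
  let train_idx := r.2
  let rest_idx := (PySem.List.pyRange 0 (labels.length : Int) 1).filter (fun x => !(train_idx.contains x))
  let val_idx := PySem.List.slice rest_idx none (some val_num)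
  let test_idx := PySem.List.slice rest_idx (some val_num) (some (val_num + test_num))
  (train_idx, val_idx, test_idx)

-- ===== PORT B =====
def limit_data_alt_loop (limit : Int) : List (Int × Int) → PySem.Dict Int Int → List Int → List Int → List Int × List Int
  | [], _, tr, rs => (tr, rs)
  | (i, label) :: rest, counts, tr, rs =>
    let c := counts.getD label 0
    if c < limit then limit_data_alt_loop limit rest (counts.insert label (c + 1)) (tr ++ [i]) rs
    else limit_data_alt_loop limit rest counts tr (rs ++ [i])

def limit_data_alt (labels : List Int) (limit : Int) (val_num : Int) (test_num : Int) : List Int × List Int × List Int :=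
  let r := limit_data_alt_loop limit (pvEnum 0 labels) PySem.Dict.empty [] []
  (r.1, PySem.List.slice r.2 none (some val_num), PySem.List.slice r.2 (some val_num) (some (val_num + test_num)))

-- ===== PRECONDITION & SPEC =====
def Spec_limit_data (labels : List Int) (limit : Int) (val_num : Int) (test_num : Int) (out : List Int × List Int × List Int) : Prop := out = limit_data_alt labels limit val_num test_num
instance (labels : List Int) (limit : Int) (val_num : Int) (test_num : Int) (out : List Int × List Int × List Int) : Decidable (Spec_limit_data labels limit val_num test_num out) := by unfold Spec_limit_data; infer_instance

-- ===== CLAIM (what is proved, stated in full; the proofs are below) =====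
def Claim_equal_limit_data : Prop := ∀ (labels : List Int) (limit : Int) (val_num : Int) (test_num : Int), Dom_limit_data labels limit val_num test_num → Spec_limit_data labels limit val_num test_num (limit_data labels limit val_num test_num)

-- ===== LEMMAS AND PROOFS =====

-- the enumerated labels come from the original list
theorem pvEnum_snd_mem (ls : List Int) : ∀ (i : Int) (p : Int × Int), p ∈ pvEnum i ls → p.2 ∈ ls := by
  induction ls with
  | nil => intro i p h; simp [pvEnum] at h
  | cons l ls ih =>
    intro i p h
    simp [pvEnum] at h
    rcases h with h | h
    · simp [h]
    · exact List.mem_cons_of_mem _ (ih _ _ h)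

-- the enumerated indices are exactly range(i, i + len)
theorem pvEnum_fst (ls : List Int) : ∀ i : Int, (pvEnum i ls).map Prod.fst = PySem.List.pyRange i (i + (ls.length : Int)) 1 := by
  induction ls with
  | nil => intro i; simp [pvEnum]
  | cons l ls ih =>
    intro i
    have h : i < i + ((l :: ls).length : Int) := by simp
    rw [PySem.List.pyRange_one_cons h]
    simp only [pvEnum, List.map_cons, ih (i + 1), List.length_cons]
    congr 2
    push_cast
    ring

theorem pvEnum_fst0 (labels : List Int) : (pvEnum 0 labels).map Prod.fst = PySem.List.pyRange 0 (labels.length : Int) 1 := by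
  rw [pvEnum_fst]; norm_num

-- B's loop only ever appends to its accumulators, with indices drawn from the input
theorem altLoop_shape (limit : Int) (ps : List (Int × Int)) : ∀ counts tr rs,
    ∃ t r, limit_data_alt_loop limit ps counts tr rs = (tr ++ t, rs ++ r) ∧
      (∀ x ∈ t, x ∈ ps.map Prod.fst) ∧ (∀ x ∈ r, x ∈ ps.map Prod.fst) := by
  induction ps with
  | nil => intro counts tr rs; exact ⟨[], [], by simp [limit_data_alt_loop], by simp, by simp⟩
  | cons p ps ih =>
    intro counts tr rs
    obtain ⟨i, label⟩ := p
    by_cases h : counts.getD label 0 < limit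
    · obtain ⟨t, r, he, ht, hr⟩ := ih (counts.insert label (counts.getD label 0 + 1)) (tr ++ [i]) rs
      refine ⟨i :: t, r, ?_, ?_, ?_⟩
      · simp only [limit_data_alt_loop, if_pos h, he, List.append_assoc, List.singleton_append]
      · intro x hx
        rcases List.mem_cons.mp hx with rfl | hx
        · simp
        · exact List.mem_cons_of_mem _ (ht x hx)
      · intro x hx; exact List.mem_cons_of_mem _ (hr x hx)
    · obtain ⟨t, r, he, ht, hr⟩ := ih counts tr (rs ++ [i])
      refine ⟨t, i :: r, ?_, ?_, ?_⟩
      · simp only [limit_data_alt_loop, if_neg h, he, List.append_assoc, List.singleton_append]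
      · intro x hx; exact List.mem_cons_of_mem _ (ht x hx)
      · intro x hx
        rcases List.mem_cons.mp hx with rfl | hx
        · simp
        · exact List.mem_cons_of_mem _ (hr x hx)

-- B's rest list is the complement (in input order) of B's final train list
theorem altLoop_rest (limit : Int) (ps : List (Int × Int)) : ∀ counts tr rs,
    (ps.map Prod.fst).Nodup → (∀ p ∈ ps, p.1 ∉ tr) →
    (limit_data_alt_loop limit ps counts tr rs).2 =
      rs ++ (ps.map Prod.fst).filter (fun x => !((limit_data_alt_loop limit ps counts tr rs).1.contains x)) := by
  induction ps with
  | nil => intro counts tr rs _ _; simp [limit_data_alt_loop]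
  | cons p ps ih =>
    intro counts tr rs hnd htr
    obtain ⟨i, label⟩ := p
    simp only [List.map_cons, List.nodup_cons] at hnd
    by_cases h : counts.getD label 0 < limit
    · have hrec : limit_data_alt_loop limit ((i, label) :: ps) counts tr rs =
        limit_data_alt_loop limit ps (counts.insert label (counts.getD label 0 + 1)) (tr ++ [i]) rs := by
        simp only [limit_data_alt_loop, if_pos h]
      rw [hrec]
      have hmem : i ∈ (limit_data_alt_loop limit ps (counts.insert label (counts.getD label 0 + 1)) (tr ++ [i]) rs).1 := by
        obtain ⟨t, r, he, _, _⟩ := altLoop_shape limit ps (counts.insert label (counts.getD label 0 + 1)) (tr ++ [i]) rs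
        rw [he]; simp
      rw [ih _ _ _ hnd.2 ?_]
      · simp only [List.map_cons, List.filter_cons]
        have : ((limit_data_alt_loop limit ps (counts.insert label (counts.getD label 0 + 1)) (tr ++ [i]) rs).1.contains i) = true := by
          simpa using hmem
        simp [hmem]
      · intro p hp
        simp only [List.mem_append, List.mem_singleton]
        push Not
        exact ⟨htr p (List.mem_cons_of_mem _ hp), fun he => hnd.1 (he ▸ List.mem_map_of_mem hp)⟩
    · have hrec : limit_data_alt_loop limit ((i, label) :: ps) counts tr rs =
        limit_data_alt_loop limit ps counts tr (rs ++ [i]) := by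
        simp only [limit_data_alt_loop, if_neg h]
      rw [hrec]
      have hnot : i ∉ (limit_data_alt_loop limit ps counts tr (rs ++ [i])).1 := by
        obtain ⟨t, r, he, ht, _⟩ := altLoop_shape limit ps counts tr (rs ++ [i])
        rw [he]
        intro hx
        rcases List.mem_append.mp hx with hx | hx
        · exact htr (i, label) (List.mem_cons_self) hx
        · exact hnd.1 (ht i hx)
      rw [ih _ _ _ hnd.2 fun p hp => htr p (List.mem_cons_of_mem _ hp)]
      simp only [List.map_cons, List.filter_cons]
      have : ((limit_data_alt_loop limit ps counts tr (rs ++ [i])).1.contains i) = false := by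
        simpa using hnot
      simp [hnot]

-- once no label can be below the cap, B's loop sends everything to rest
theorem altLoop_stall (limit : Int) (ps : List (Int × Int)) : ∀ counts tr rs,
    (∀ p ∈ ps, ¬ counts.getD p.2 0 < limit) →
    limit_data_alt_loop limit ps counts tr rs = (tr, rs ++ ps.map Prod.fst) := by
  induction ps with
  | nil => intro counts tr rs _; simp [limit_data_alt_loop]
  | cons p ps ih =>
    intro counts tr rs hall
    obtain ⟨i, label⟩ := p
    have h := hall (i, label) (List.mem_cons_self)
    simp only [limit_data_alt_loop, if_neg h]
    rw [ih counts tr (rs ++ [i]) fun p hp => hall p (List.mem_cons_of_mem _ hp)]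
    simp

-- a value stored under a contained key appears among the dict's values
theorem getD_all_values {d : PySem.Dict Int Int} {f : Int → Bool} (hk : d.contains k = true)
    (hall : d.values.all f = true) : f (d.getD k 0) = true := by
  rw [PySem.Dict.contains_eq_isSome_get?] at hk
  obtain ⟨v, hv⟩ := Option.isSome_iff_exists.mp hk
  have hmem : (k, v) ∈ d.items := PySem.Dict.mem_items_of_get?_eq_some d hv
  have hvmem : v ∈ d.values := by
    simp only [PySem.Dict.values]
    exact List.mem_map_of_mem hmem
  have hgd : d.getD k 0 = v := by rw [PySem.Dict.getD_eq_get?_getD, hv]; rfl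
  rw [hgd]
  exact List.all_eq_true.mp hall v hvmem

-- the heart: A's capped loop with early break produces the same train list as B's loop
theorem loop_sync (limit : Int) (ps : List (Int × Int)) : ∀ (d counts : PySem.Dict Int Int) (tr rs : List Int),
    (∀ l, d.getD l 0 = counts.getD l 0) → (∀ p ∈ ps, d.contains p.2 = true) →
    (limit_data_loopA limit ps d tr).2 = (limit_data_alt_loop limit ps counts tr rs).1 := by
  induction ps with
  | nil => intro d counts tr rs _ _; simp [limit_data_loopA, limit_data_alt_loop]
  | cons p ps ih =>
    intro d counts tr rs hsync hkeys
    obtain ⟨i, label⟩ := p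
    by_cases h : d.getD label 0 < limit
    · have h' : counts.getD label 0 < limit := by rw [← hsync]; exact h
      have hsync' : ∀ l, (d.insert label (d.getD label 0 + 1)).getD l 0 =
          (counts.insert label (counts.getD label 0 + 1)).getD l 0 := by
        intro l
        rw [PySem.Dict.getD_insert, PySem.Dict.getD_insert, hsync label, hsync l]
      have hkeys' : ∀ p ∈ ps, (d.insert label (d.getD label 0 + 1)).contains p.2 = true := by
        intro p hp
        rw [PySem.Dict.contains_insert, hkeys p (List.mem_cons_of_mem _ hp), Bool.or_true]
      have hB : limit_data_alt_loop limit ((i, label) :: ps) counts tr rs =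
          limit_data_alt_loop limit ps (counts.insert label (counts.getD label 0 + 1)) (tr ++ [i]) rs := by
        simp only [limit_data_alt_loop, if_pos h']
      have hA : limit_data_loopA limit ((i, label) :: ps) d tr =
          if (d.insert label (d.getD label 0 + 1)).values.all (fun c => c == limit) then
            (d.insert label (d.getD label 0 + 1), tr ++ [i])
          else limit_data_loopA limit ps (d.insert label (d.getD label 0 + 1)) (tr ++ [i]) := by
        simp only [limit_data_loopA, if_pos h]
      rw [hA, hB]
      by_cases hb : (d.insert label (d.getD label 0 + 1)).values.all (fun c => c == limit) = true
      · rw [if_pos hb, altLoop_stall limit ps (counts.insert label (counts.getD label 0 + 1)) (tr ++ [i]) rs (by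
          intro p hp
          have hv := getD_all_values (hkeys' p hp) hb
          rw [← hsync' p.2]
          simp only [beq_iff_eq] at hv
          omega)]
      · rw [if_neg hb]
        exact ih _ _ _ _ hsync' hkeys'
    · have h' : ¬ counts.getD label 0 < limit := by rw [← hsync]; exact h
      have hB : limit_data_alt_loop limit ((i, label) :: ps) counts tr rs =
          limit_data_alt_loop limit ps counts tr (rs ++ [i]) := by
        simp only [limit_data_alt_loop, if_neg h']
      have hA : limit_data_loopA limit ((i, label) :: ps) d tr =
          if d.values.all (fun c => c == limit) then (d, tr)
          else limit_data_loopA limit ps d tr := by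
        simp only [limit_data_loopA, if_neg h]
      rw [hA, hB]
      by_cases hb : d.values.all (fun c => c == limit) = true
      · rw [if_pos hb, altLoop_stall limit ps counts tr (rs ++ [i]) (by
          intro p hp
          have hv := getD_all_values (hkeys p (List.mem_cons_of_mem _ hp)) hb
          rw [← hsync p.2]
          simp only [beq_iff_eq] at hv
          omega)]
      · rw [if_neg hb]
        exact ih _ _ _ _ hsync (fun p hp => hkeys p (List.mem_cons_of_mem _ hp))

-- A's pre-initialised counter agrees with B's empty dict on every getD lookup …
theorem init_sync (labels : List Int) : ∀ (d : PySem.Dict Int Int), (∀ l, d.getD l 0 = 0) →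
    ∀ l, (labels.foldl (fun d l => d.insert l 0) d).getD l 0 = 0 := by
  induction labels with
  | nil => intro d hd l; simpa using hd l
  | cons x labels ih =>
    intro d hd l
    simp only [List.foldl_cons]
    refine ih _ ?_ l
    intro l'
    rw [PySem.Dict.getD_insert]
    split <;> simp [hd]

-- … and contains every label
theorem init_keys (labels : List Int) : ∀ (d : PySem.Dict Int Int) (l : Int),
    l ∈ labels ∨ d.contains l = true → (labels.foldl (fun d l => d.insert l 0) d).contains l = true := by
  induction labels with
  | nil => intro d l h; simpa using h
  | cons x labels ih =>
    intro d l h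
    simp only [List.foldl_cons]
    refine ih _ l ?_
    rcases h with h | h
    · rcases List.mem_cons.mp h with h | h
      · right; rw [PySem.Dict.contains_insert]; simp [h]
      · left; exact h
    · right; rw [PySem.Dict.contains_insert, h, Bool.or_true]

-- ===== VERDICT (by name: the statement is the Claim_ definition above) =====
theorem limit_data_spec : Claim_equal_limit_data := by
  intro labels limit val_num test_num _
  unfold Spec_limit_data limit_data limit_data_alt
  have hnd : ((pvEnum 0 labels).map Prod.fst).Nodup := by
    rw [pvEnum_fst0]
    exact PySem.List.nodup_pyRange_one _ _
  have htrain : (limit_data_loopA limit (pvEnum 0 labels) (labels.foldl (fun d l => d.insert l 0) PySem.Dict.empty) []).2 =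
      (limit_data_alt_loop limit (pvEnum 0 labels) PySem.Dict.empty [] []).1 := by
    refine loop_sync limit (pvEnum 0 labels) _ _ [] [] ?_ ?_
    · intro l
      rw [init_sync labels PySem.Dict.empty (fun l => by simp [pysem]) l]
      simp [pysem]
    · intro p hp
      exact init_keys labels PySem.Dict.empty p.2 (Or.inl (pvEnum_snd_mem labels 0 p hp))
  have hrest : (PySem.List.pyRange 0 (labels.length : Int) 1).filter
      (fun x => !((limit_data_loopA limit (pvEnum 0 labels) (labels.foldl (fun d l => d.insert l 0) PySem.Dict.empty) []).2.contains x)) =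
      (limit_data_alt_loop limit (pvEnum 0 labels) PySem.Dict.empty [] []).2 := by
    rw [altLoop_rest limit (pvEnum 0 labels) PySem.Dict.empty [] [] hnd (by simp)]
    rw [htrain, ← pvEnum_fst0 labels]
    simp
  simp only []
  rw [hrest, htrain]
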